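-- pv_equiv track=rewrite | github.com/idllresearch/malicious-gpt | quality/services/sumCompilable.py | checkOneLine
-- ===== SOURCE A (Python) =====
-- def checkOneLine(line_list):
--     # Extract the compilability result from the line list
--     judgements = [line["syntax"] for line in line_list if "syntax" in line]
--
--     # Determine the final compilability judgement based on the judgements list
--     if judgements == []:
--         final = "undetected"
--         return final
--
--     if "pass" in judgements:
--         final = "pass"
--     elif "error" in judgements:
--         final = "error"
--     else:
--         final = "NoCode"
--     return final
-- ===== SOURCE B (Python) =====
-- def checkOneLine(line_list):
--     # Priority-encoding reduction: map each line to a numeric severity rank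
--     # (pass=3 > error=2 > other-syntax=1 > no-syntax-key=0), take the maximum,
--     # and decode the verdict from a lookup table.  Correct because A's verdict
--     # is exactly the highest-priority judgement present.
--     rank = 0
--     for line in line_list:
--         if "syntax" in line:
--             v = line["syntax"]
--             rank = max(rank, 3 if v == "pass" else 2 if v == "error" else 1)
--     return ("undetected", "NoCode", "error", "pass")[rank]
-- ===== Notes on version B (the rewrite author's own statement) =====
-- stated objective: alternative
-- what changed: Replaces the collect-then-three-membership-scans logic with a priority encoding: each line is mapped to a numeric severity rank (pass=3, error=2, other syntax value=1, no syntax key=0), the verdict is the max rank decoded through a lookup table.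
import Mathlib
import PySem

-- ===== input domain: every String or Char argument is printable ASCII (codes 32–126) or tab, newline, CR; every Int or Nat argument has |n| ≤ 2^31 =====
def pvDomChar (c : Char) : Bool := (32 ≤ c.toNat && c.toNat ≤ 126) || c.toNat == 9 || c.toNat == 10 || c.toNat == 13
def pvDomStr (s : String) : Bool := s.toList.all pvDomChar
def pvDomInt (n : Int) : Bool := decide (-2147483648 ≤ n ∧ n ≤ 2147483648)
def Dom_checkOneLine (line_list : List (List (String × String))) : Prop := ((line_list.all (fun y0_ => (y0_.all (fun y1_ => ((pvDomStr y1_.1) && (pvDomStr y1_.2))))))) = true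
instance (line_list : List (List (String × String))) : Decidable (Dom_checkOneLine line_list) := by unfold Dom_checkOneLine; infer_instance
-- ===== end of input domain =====

-- B replaces A's collect-then-membership-scans with a priority-rank max reduction decoded via a table (alternative decomposition, same cost).


-- ===== PORT A =====
-- Builds the judgements list, then the three membership tests, as in A.
def checkOneLine (line_list : List (List (String × String))) : String :=
  let judgements := line_list.filterMap (fun line => line.lookup "syntax")
  if judgements = [] then "undetected"
  else if judgements.contains "pass" then "pass"
  else if judgements.contains "error" then "error"
  else "NoCode"

-- ===== PORT B =====
-- Max-reduction over per-line severity ranks, decoded through a lookup table.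
-- (The rank is always ≤ 3, so getD's default is never used; it only totalises the tuple index.)
def checkOneLine_alt (line_list : List (List (String × String))) : String :=
  let rank := line_list.foldl
    (fun (rank : Nat) line =>
      match line.lookup "syntax" with
      | none => rank
      | some v => max rank (if v == "pass" then 3 else if v == "error" then 2 else 1))
    0
  ["undetected", "NoCode", "error", "pass"].getD rank "undetected"

-- ===== PRECONDITION & SPEC =====
def Spec_checkOneLine (line_list : List (List (String × String))) (out : String) : Prop := out = checkOneLine_alt line_list
instance (line_list : List (List (String × String))) (out : String) : Decidable (Spec_checkOneLine line_list out) := by unfold Spec_checkOneLine; infer_instance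

-- ===== CLAIM (what is proved, stated in full; the proofs are below) =====
def Claim_equal_checkOneLine : Prop := ∀ (line_list : List (List (String × String))), Dom_checkOneLine line_list → Spec_checkOneLine line_list (checkOneLine line_list)

-- ===== LEMMAS AND PROOFS =====

-- The rank of the judgements extracted so far, as a closed expression.
def pvRankOf (J : List String) : Nat :=
  if J.contains "pass" then 3 else if J.contains "error" then 2 else if J = [] then 0 else 1

theorem pvRankOf_cons (v : String) (J : List String) :
    pvRankOf (v :: J) =
      max (if v == "pass" then 3 else if v == "error" then 2 else 1) (pvRankOf J) := by
  unfold pvRankOf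
  by_cases hp : v = "pass" <;> by_cases he : v = "error" <;>
    by_cases h1 : J.contains "pass" = true <;> by_cases h2 : J.contains "error" = true <;>
      by_cases h3 : J = [] <;>
        simp_all <;> first | omega | simp [Ne.symm hp, Ne.symm he]

-- B's fold computes max of the start value and the rank of the extracted judgements.
theorem checkOneLine_alt_fold (line_list : List (List (String × String))) (m : Nat) :
    line_list.foldl
      (fun (rank : Nat) line =>
        match line.lookup "syntax" with
        | none => rank
        | some v => max rank (if v == "pass" then 3 else if v == "error" then 2 else 1))
      m
    = max m (pvRankOf (line_list.filterMap (fun line => line.lookup "syntax"))) := by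
  induction line_list generalizing m with
  | nil => simp [pvRankOf]
  | cons hd tl ih =>
    cases h : hd.lookup "syntax" with
    | none =>
      simp only [List.foldl_cons, List.filterMap_cons, h]
      exact ih m
    | some v =>
      simp only [List.foldl_cons, List.filterMap_cons, h, pvRankOf_cons]
      rw [ih, Nat.max_assoc]

-- ===== VERDICT (by name: the statement is the Claim_ definition above) =====
theorem checkOneLine_spec : Claim_equal_checkOneLine := by
  intro line_list _
  unfold Spec_checkOneLine checkOneLine checkOneLine_alt
  rw [checkOneLine_alt_fold]
  simp only [Nat.zero_max]
  set J := line_list.filterMap (fun line => line.lookup "syntax") with hJ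
  unfold pvRankOf
  by_cases h1 : J.contains "pass" = true <;> by_cases h2 : J.contains "error" = true <;>
    by_cases h3 : J = [] <;>
      simp only [h1, h2, h3, if_true, if_false, List.getD, Bool.false_eq_true] <;> rfl
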